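-- pv_equiv track=rewrite | github.com/shhxx02/customer-service-analyzer | sentiment_utils.py | detect_escalation
-- ===== SOURCE A (Python) =====
-- from typing import Dict, List, Tuple
--
-- def detect_escalation(labels: List[str], window: int = 3) -> bool:
--     """
--     Return True if there are at least `window` consecutive 'Negative' labels.
--     """
--     consecutive = 0
--     for lab in labels:
--         if lab == "Negative":
--             consecutive += 1
--             if consecutive >= window:
--                 return True
--         else:
--             consecutive = 0
--     return False
-- ===== SOURCE B (Python) =====
-- from itertools import groupby
-- from typing import List
--
-- def detect_escalation(labels: List[str], window: int = 3) -> bool: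
--     return any(lab == "Negative" and sum(1 for _ in grp) >= window
--                for lab, grp in groupby(labels))
-- ===== Notes on version B (the rewrite author's own statement) =====
-- stated objective: idiomatic
-- what changed: Replaces the manual consecutive-counter loop with itertools.groupby over maximal runs of equal labels, returning True via any() iff some 'Negative' run has length >= window.
import Mathlib
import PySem

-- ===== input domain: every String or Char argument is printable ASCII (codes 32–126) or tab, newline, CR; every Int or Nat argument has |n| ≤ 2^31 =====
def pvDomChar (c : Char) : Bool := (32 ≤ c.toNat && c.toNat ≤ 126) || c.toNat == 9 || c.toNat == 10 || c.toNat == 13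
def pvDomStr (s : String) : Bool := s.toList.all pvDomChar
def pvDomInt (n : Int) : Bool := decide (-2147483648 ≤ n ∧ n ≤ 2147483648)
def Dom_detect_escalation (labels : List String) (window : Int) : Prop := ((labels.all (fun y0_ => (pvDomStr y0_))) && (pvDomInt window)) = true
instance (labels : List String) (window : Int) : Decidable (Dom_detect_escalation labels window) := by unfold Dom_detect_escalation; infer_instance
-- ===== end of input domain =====

-- B replaces A's manual consecutive-counter loop by a groupby-style scan over maximal runs (idiomatic decomposition; same behaviour, return value only).


-- ===== PORT A =====
-- Port of A: counter over labels with early return (goA carries `consecutive`).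
def goA : List String → Int → Int → Bool
  | [], _, _ => false
  | lab :: rest, window, consecutive =>
      if lab = "Negative" then
        if consecutive + 1 ≥ window then true
        else goA rest window (consecutive + 1)
      else goA rest window 0

def detect_escalation (labels : List String) (window : Int) : Bool :=
  goA labels window 0

-- ===== PORT B =====
-- Port of B: groupby-style maximal runs, then any() over the runs.
def groupRuns : List String → List (String × Nat)
  | [] => []
  | x :: xs =>
      (x, 1 + (xs.takeWhile (· == x)).length) :: groupRuns (xs.dropWhile (· == x))
termination_by l => l.length
decreasing_by
  simp only [List.length_cons]
  exact Nat.lt_succ_of_le (List.length_dropWhile_le _ _)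

def detect_escalation_alt (labels : List String) (window : Int) : Bool :=
  (groupRuns labels).any (fun p => p.1 == "Negative" && decide ((p.2 : Int) ≥ window))

-- ===== PRECONDITION & SPEC =====
def Spec_detect_escalation (labels : List String) (window : Int) (out : Bool) : Prop := out = detect_escalation_alt labels window
instance (labels : List String) (window : Int) (out : Bool) : Decidable (Spec_detect_escalation labels window out) := by unfold Spec_detect_escalation; infer_instance

-- ===== CLAIM (what is proved, stated in full; the proofs are below) =====
def Claim_equal_detect_escalation : Prop := ∀ (labels : List String) (window : Int), Dom_detect_escalation labels window → Spec_detect_escalation labels window (detect_escalation labels window)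

-- ===== LEMMAS AND PROOFS =====

-- On a block of "Negative"s, A's counter either crosses the window inside the block
-- (iff the block is nonempty and c + |b| ≥ w) or exits with counter c + |b|.
theorem goA_negBlock (b rest : List String) (w c : Int)
    (hb : ∀ y ∈ b, y = "Negative") :
    goA (b ++ rest) w c =
      (if b ≠ [] ∧ c + (b.length : Int) ≥ w then true
       else goA rest w (c + (b.length : Int))) := by
  induction b generalizing c with
  | nil => simp
  | cons y b' ih =>
    have hy : y = "Negative" := hb y (List.mem_cons_self ..)
    have hb' : ∀ z ∈ b', z = "Negative" := fun z hz => hb z (List.mem_cons_of_mem _ hz)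
    subst hy
    simp only [List.cons_append, goA, reduceIte]
    rw [ih _ hb']
    by_cases h1 : c + 1 ≥ w
    · rw [if_pos h1,
        if_pos ⟨List.cons_ne_nil _ _, by simp only [List.length_cons]; push_cast; omega⟩]
    · rw [if_neg h1]
      by_cases h2 : b' ≠ [] ∧ c + 1 + (b'.length : Int) ≥ w
      · rw [if_pos h2,
          if_pos ⟨List.cons_ne_nil _ _, by simp only [List.length_cons]; push_cast; omega⟩]
      · rw [if_neg h2]
        have h3 : ¬("Negative" :: b' ≠ [] ∧ c + ((("Negative" : String) :: b').length : Int) ≥ w) := by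
          rintro ⟨-, hge⟩
          simp only [List.length_cons] at hge
          push_cast at hge
          by_cases hb0 : b' = []
          · subst hb0; simp at hge; omega
          · exact h2 ⟨hb0, by omega⟩
        rw [if_neg h3]
        congr 1
        simp only [List.length_cons]; push_cast; ring

-- If the first label is not "Negative", the counter resets, so its value is irrelevant.
theorem goA_reset (rest : List String) (w c : Int)
    (h : ∀ y ∈ rest.head?, y ≠ "Negative") :
    goA rest w c = goA rest w 0 := by
  cases rest with
  | nil => rfl
  | cons y r =>
    have hy : y ≠ "Negative" := h y (by simp)
    simp [goA, hy]

-- The element just after a dropWhile fails the predicate.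
theorem head_dropWhile_ne (p : String → Bool) (l : List String) :
    ∀ y ∈ (l.dropWhile p).head?, p y = false := by
  induction l with
  | nil => simp
  | cons x xs ih =>
    intro y hy
    by_cases hx : p x
    · rw [List.dropWhile_cons, if_pos hx] at hy
      exact ih y hy
    · rw [List.dropWhile_cons, if_neg hx] at hy
      simp only [List.head?_cons, Option.mem_def, Option.some.injEq] at hy
      subst hy
      simpa using hx

theorem goA_eq_alt (labels : List String) (w : Int) :
    goA labels w 0 = detect_escalation_alt labels w := by
  induction labels using groupRuns.induct with
  | case1 => simp [goA, detect_escalation_alt, groupRuns]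
  | case2 x xs ih =>
    have hsplit : x :: xs = (x :: xs.takeWhile (· == x)) ++ xs.dropWhile (· == x) := by
      simp [List.takeWhile_append_dropWhile]
    rw [detect_escalation_alt, groupRuns]
    simp only [List.any_cons]
    by_cases hx : x = "Negative"
    · -- Negative run: A crosses the window inside the run iff the run is long enough.
      subst hx
      have hall : ∀ y ∈ ("Negative" : String) :: xs.takeWhile (· == "Negative"), y = "Negative" := by
        intro y hy
        rcases List.mem_cons.1 hy with h | h
        · exact h
        · simpa using List.mem_takeWhile_imp h
      have hhead : ∀ y ∈ (xs.dropWhile (· == ("Negative" : String))).head?, y ≠ "Negative" := by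
        intro y hy
        have := head_dropWhile_ne (· == ("Negative" : String)) xs y hy
        simpa using this
      rw [hsplit, goA_negBlock _ _ _ _ hall]
      by_cases hw : ((1 + (xs.takeWhile (· == ("Negative" : String))).length : Nat) : Int) ≥ w
      · rw [if_pos ⟨List.cons_ne_nil _ _, by simp only [List.length_cons]; push_cast at hw ⊢; omega⟩]
        simp
        exact Or.inl (by push_cast at hw; omega)
      · rw [if_neg (by rintro ⟨-, hge⟩; simp only [List.length_cons] at hge; push_cast at hge hw; omega)]
        rw [goA_reset _ _ _ hhead, ih]
        simp [detect_escalation_alt]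
        intro hge
        exact absurd hge (by push_cast at hw; omega)
    · -- non-Negative run: A walks through it resetting, B's predicate is false on it.
      have hstep : ∀ (b : List String) (z : String) (c : Int), z = x → (∀ y ∈ b, y = x) →
          goA ((z :: b) ++ xs.dropWhile (· == x)) w c = goA (xs.dropWhile (· == x)) w 0 := by
        intro b
        induction b with
        | nil =>
          intro z c hz _
          have : z ≠ "Negative" := by rw [hz]; exact hx
          simp [goA, this]
        | cons z2 b3 ihb =>
          intro z c hz hb
          have : z ≠ "Negative" := by rw [hz]; exact hx
          simp only [List.cons_append, goA, if_neg this]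
          exact ihb z2 0 (hb z2 (List.mem_cons_self ..))
            (fun y hy => hb y (List.mem_cons_of_mem _ hy))
      have hallx : ∀ y ∈ xs.takeWhile (· == x), y = x := by
        intro y hy
        simpa using List.mem_takeWhile_imp hy
      rw [hsplit, hstep _ x 0 rfl hallx, ih]
      simp [detect_escalation_alt, hx]

-- ===== VERDICT (by name: the statement is the Claim_ definition above) =====
theorem detect_escalation_spec : Claim_equal_detect_escalation := by
  intro labels window _
  unfold Spec_detect_escalation detect_escalation
  exact goA_eq_alt labels window
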